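-- pv_equiv track=rewrite | github.com/tf-swarm/bird_server | bird/lemon/lemon/games/bird/share.py | get_record_sort
-- ===== SOURCE A (Python) =====
-- def get_record_sort(share_reward):
--     sort1 = []
--     sort2 = []
--     for ns in share_reward:
--         if len(ns['ids']):
--             sort1.append(ns)
--         else:
--             sort2.append(ns)
--     multi_sorted = sorted(sort1, key=lambda x: len(x['ids']))
--     sort2.extend(multi_sorted)
--     return sort2
-- ===== SOURCE B (Python) =====
-- def get_record_sort(share_reward):
--     return sorted(share_reward, key=lambda x: len(x['ids']))
-- ===== Notes on version B (the rewrite author's own statement) =====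
-- stated objective: simpler
-- what changed: Replaces the explicit partition into empty/non-empty lists, the separate sort and the concatenation with a single stable sort of the whole list by len(x['ids']), whose stability reproduces A's ordering exactly.
import Mathlib
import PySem

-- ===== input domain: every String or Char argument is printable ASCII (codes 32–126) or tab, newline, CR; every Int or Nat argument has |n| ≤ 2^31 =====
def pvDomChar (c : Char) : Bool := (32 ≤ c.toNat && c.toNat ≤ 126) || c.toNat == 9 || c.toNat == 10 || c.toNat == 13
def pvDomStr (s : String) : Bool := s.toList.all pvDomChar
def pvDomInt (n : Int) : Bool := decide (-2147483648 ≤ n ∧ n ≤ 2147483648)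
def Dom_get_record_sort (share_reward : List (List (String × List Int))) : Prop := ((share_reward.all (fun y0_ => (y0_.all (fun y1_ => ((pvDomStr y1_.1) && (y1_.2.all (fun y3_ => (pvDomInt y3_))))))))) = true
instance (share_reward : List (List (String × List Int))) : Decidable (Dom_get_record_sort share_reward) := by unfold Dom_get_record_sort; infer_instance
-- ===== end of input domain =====

-- B replaces A's partition/sort/concatenate with one stable sort by len(x['ids']); same cost, simpler.

-- ===== PORT A =====
-- dict lookup ns['ids'] (first match in the association list); under Pre_ the key is present,
-- the 0 default is never reached there.
def idsLen (ns : List (String × List Int)) : Nat :=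
  match ns.find? (fun p => p.1 == "ids") with
  | some p => p.2.length
  | none => 0

def get_record_sort (share_reward : List (List (String × List Int))) : List (List (String × List Int)) :=
  let s := share_reward.foldl
    (fun (acc : List (List (String × List Int)) × List (List (String × List Int))) ns =>
      if idsLen ns ≠ 0 then (acc.1 ++ [ns], acc.2) else (acc.1, acc.2 ++ [ns]))
    ([], [])
  let multi_sorted := PySem.List.sorted s.1 (fun x => idsLen x) false
  s.2 ++ multi_sorted

-- ===== PORT B =====
def get_record_sort_alt (share_reward : List (List (String × List Int))) : List (List (String × List Int)) :=
  PySem.List.sorted share_reward (fun x => idsLen x) false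

-- ===== PRECONDITION & SPEC =====
-- Pre_ excludes records without an 'ids' key: there both A and B raise KeyError.
def Pre_get_record_sort (share_reward : List (List (String × List Int))) : Prop :=
  ∀ ns ∈ share_reward, (ns.find? (fun p => p.1 == "ids")).isSome = true
instance (share_reward : List (List (String × List Int))) : Decidable (Pre_get_record_sort share_reward) := by unfold Pre_get_record_sort; infer_instance
def pvWitness_get_record_sort : (List (List (String × List Int))) := [[("ids", [1, 2])], [("ids", [])], [("ids", [3])]]

def Spec_get_record_sort (share_reward : List (List (String × List Int))) (out : List (List (String × List Int))) : Prop := out = get_record_sort_alt share_reward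
instance (share_reward : List (List (String × List Int))) (out : List (List (String × List Int))) : Decidable (Spec_get_record_sort share_reward out) := by unfold Spec_get_record_sort; infer_instance

-- ===== CLAIM (what is proved, stated in full; the proofs are below) =====
def Claim_equal_get_record_sort : Prop := ∀ (share_reward : List (List (String × List Int))), Dom_get_record_sort share_reward → Pre_get_record_sort share_reward → Spec_get_record_sort share_reward (get_record_sort share_reward)

-- ===== LEMMAS AND PROOFS =====

-- insert skips a prefix on which `before` never fires
theorem insertBy_append_left {α : Type} (before : α → α → Bool) (a : α) (ys zs : List α)
    (h : ∀ y ∈ ys, before a y = false) :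
    PySem.List.insertBy before a (ys ++ zs) = ys ++ PySem.List.insertBy before a zs := by
  induction ys with
  | nil => rfl
  | cons y ys ih =>
    simp only [List.cons_append, PySem.List.insertBy, h y (by simp)]
    simp only [Bool.false_eq_true, if_false, List.cons.injEq, true_and]
    exact ih (fun y hy => h y (by simp [hy]))

-- one step of insertion sort, from the right
theorem sorted_snoc {α : Type} (xs : List α) (a : α) (key : α → Nat) :
    PySem.List.sorted (xs ++ [a]) key false
      = PySem.List.insertBy (fun p q => decide (key p < key q)) a (PySem.List.sorted xs key false) := by
  rw [PySem.List.sorted_eq_foldl_insertBy, PySem.List.sorted_eq_foldl_insertBy, List.foldl_append]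
  rfl

-- the stable sort puts the key-0 elements first, in order, then the sorted rest
theorem sorted_split {α : Type} (key : α → Nat) (xs : List α) :
    PySem.List.sorted xs key false
      = xs.filter (fun x => key x == 0) ++ PySem.List.sorted (xs.filter (fun x => key x != 0)) key false := by
  induction xs using List.reverseRecOn with
  | nil => rfl
  | append_singleton xs a ih =>
    rw [sorted_snoc, ih, List.filter_append, List.filter_append]
    by_cases h : key a = 0
    · rw [insertBy_append_left _ _ _ _ (by
        intro y hy
        have : key y = 0 := by simpa using (List.mem_filter.mp hy).2
        simp [h, this])]
      have hz : PySem.List.insertBy (fun p q => decide (key p < key q)) a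
          (PySem.List.sorted (xs.filter (fun x => key x != 0)) key false)
          = a :: PySem.List.sorted (xs.filter (fun x => key x != 0)) key false := by
        cases hs : PySem.List.sorted (xs.filter (fun x => key x != 0)) key false with
        | nil => rfl
        | cons b t =>
          have hb : b ∈ xs.filter (fun x => key x != 0) := by
            rw [← PySem.List.mem_sorted _ key false, hs]; simp
          have : key b ≠ 0 := by simpa using (List.mem_filter.mp hb).2
          simp [PySem.List.insertBy, h, Nat.pos_of_ne_zero this]
      rw [hz]
      simp [h]
    · rw [insertBy_append_left _ _ _ _ (by
        intro y hy
        have : key y = 0 := by simpa using (List.mem_filter.mp hy).2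
        simp [this])]
      rw [← sorted_snoc]
      simp [h]

-- A's partition loop computes the two filters
theorem foldl_partition {α : Type} (key : α → Nat) (xs : List α)
    (s1 s2 : List α) :
    xs.foldl (fun (acc : List α × List α) ns =>
        if key ns ≠ 0 then (acc.1 ++ [ns], acc.2) else (acc.1, acc.2 ++ [ns])) (s1, s2)
      = (s1 ++ xs.filter (fun x => key x != 0), s2 ++ xs.filter (fun x => key x == 0)) := by
  induction xs generalizing s1 s2 with
  | nil => simp
  | cons x xs ih =>
    rw [List.foldl_cons]
    by_cases h : key x = 0
    · rw [if_neg (by simp [h]), ih]; simp [h]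
    · rw [if_pos h, ih]; simp [h]

-- ===== VERDICT (by name: the statement is the Claim_ definition above) =====
theorem get_record_sort_spec : Claim_equal_get_record_sort := by
  intro share_reward _ _
  show get_record_sort share_reward = get_record_sort_alt share_reward
  unfold get_record_sort get_record_sort_alt
  rw [foldl_partition (fun x => idsLen x)]
  simp only [List.nil_append]
  rw [sorted_split (fun x => idsLen x) share_reward]
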